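-- pv_equiv track=rewrite | github.com/avalanchesiqi/twitter-sampling | utils/bowtie.py | is_in_component
-- ===== SOURCE A (Python) =====
-- def is_in_component(scc, graph_embedding, largest_scc):
--     # is scc an IN component to largest_scc?
--     out_nodes = set()
--     for src in scc:
--         out_nodes.update(graph_embedding[src])
--     if len(out_nodes.intersection(set(largest_scc))) > 0:
--         return True
--     else:
--         return False
-- ===== SOURCE B (Python) =====
-- def is_in_component(scc, graph_embedding, largest_scc):
--     # is scc an IN component to largest_scc?
--     # Sort-then-merge: sort the flattened out-neighbours and the targets,
--     # then a two-pointer scan detects a common element without any hash set.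
--     outs = sorted(n for src in scc for n in graph_embedding[src])
--     targets = sorted(largest_scc)
--     i = j = 0
--     while i < len(outs) and j < len(targets):
--         if outs[i] < targets[j]:
--             i += 1
--         elif targets[j] < outs[i]:
--             j += 1
--         else:
--             return True
--     return False
-- ===== Notes on version B (the rewrite author's own statement) =====
-- stated objective: alternative
-- what changed: B replaces A's hash-set union + set intersection with a sort-then-merge algorithm: it sorts the flattened out-neighbour list and the target list and runs a two-pointer scan that stops at the first common element; no set is ever built.
import Mathlib
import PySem

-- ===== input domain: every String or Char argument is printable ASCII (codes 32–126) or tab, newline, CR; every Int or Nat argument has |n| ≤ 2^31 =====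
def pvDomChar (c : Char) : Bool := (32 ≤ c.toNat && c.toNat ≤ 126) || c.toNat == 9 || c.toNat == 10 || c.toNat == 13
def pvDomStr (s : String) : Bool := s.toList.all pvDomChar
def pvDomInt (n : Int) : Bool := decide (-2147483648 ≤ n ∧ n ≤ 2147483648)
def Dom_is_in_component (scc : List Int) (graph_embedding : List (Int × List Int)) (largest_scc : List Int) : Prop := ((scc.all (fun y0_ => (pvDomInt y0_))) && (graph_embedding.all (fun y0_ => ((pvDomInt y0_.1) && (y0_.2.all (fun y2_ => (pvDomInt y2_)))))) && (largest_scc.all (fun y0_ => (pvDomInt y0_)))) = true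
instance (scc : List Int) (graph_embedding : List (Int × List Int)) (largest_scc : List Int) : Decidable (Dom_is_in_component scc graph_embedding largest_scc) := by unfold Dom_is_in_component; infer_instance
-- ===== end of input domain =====

-- B replaces A's union-set-plus-intersection with sort-then-merge: sort the flattened
-- out-neighbours and the targets, then a two-pointer merge scan finds a common element;
-- objective: alternative algorithm. Equal return value on Pre_ (A raises KeyError outside it).

-- ===== PORT A =====
def is_in_component (scc : List Int) (graph_embedding : List (Int × List Int)) (largest_scc : List Int) : Bool :=
  let d := PySem.Dict.ofList graph_embedding
  -- out_nodes = set(); for src in scc: out_nodes.update(graph_embedding[src])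
  -- (getD with default [] is total; Pre_ guarantees every src is a key, where Python returns)
  let out_nodes : PySem.Set Int :=
    scc.foldl (fun s src => PySem.Set.update s (d.getD src [])) PySem.Set.empty
  if 0 < PySem.Set.len (PySem.Set.inter out_nodes (PySem.Set.ofList largest_scc)) then
    true
  else
    false

-- ===== PORT B =====
-- the two-pointer while loop of Source B, transcribed as recursion on the two sorted lists
def mergeHasCommon : List Int → List Int → Bool
  | [], _ => false
  | _ :: _, [] => false
  | a :: as, b :: bs =>
    if a < b then mergeHasCommon as (b :: bs)
    else if b < a then mergeHasCommon (a :: as) bs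
    else true
termination_by xs ys => xs.length + ys.length

def is_in_component_alt (scc : List Int) (graph_embedding : List (Int × List Int)) (largest_scc : List Int) : Bool :=
  let d := PySem.Dict.ofList graph_embedding
  let outs := PySem.List.sorted (scc.flatMap (fun src => d.getD src [])) (fun x => x) false
  let targets := PySem.List.sorted largest_scc (fun x => x) false
  mergeHasCommon outs targets

-- ===== PRECONDITION & SPEC =====
-- Pre_ excludes exactly the inputs where A raises KeyError: some src in scc is not a key of graph_embedding.
def Pre_is_in_component (scc : List Int) (graph_embedding : List (Int × List Int)) (_largest_scc : List Int) : Prop :=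
  ∀ src ∈ scc, src ∈ graph_embedding.map Prod.fst
instance (scc : List Int) (graph_embedding : List (Int × List Int)) (largest_scc : List Int) : Decidable (Pre_is_in_component scc graph_embedding largest_scc) := by unfold Pre_is_in_component; infer_instance

def pvWitness_is_in_component : List Int × (List (Int × List Int)) × List Int := ([0, 1], [(0, [2, 3]), (1, [])], [3, 4])

def Spec_is_in_component (scc : List Int) (graph_embedding : List (Int × List Int)) (largest_scc : List Int) (out : Bool) : Prop := out = is_in_component_alt scc graph_embedding largest_scc
instance (scc : List Int) (graph_embedding : List (Int × List Int)) (largest_scc : List Int) (out : Bool) : Decidable (Spec_is_in_component scc graph_embedding largest_scc out) := by unfold Spec_is_in_component; infer_instance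

-- ===== CLAIM =====
def Claim_equal_is_in_component : Prop := ∀ (scc : List Int) (graph_embedding : List (Int × List Int)) (largest_scc : List Int), Dom_is_in_component scc graph_embedding largest_scc → Pre_is_in_component scc graph_embedding largest_scc → Spec_is_in_component scc graph_embedding largest_scc (is_in_component scc graph_embedding largest_scc)

-- ===== LEMMAS AND PROOFS =====

-- membership in A's accumulated union of neighbour lists
theorem mem_foldl_update {f : Int → List Int} {scc : List Int} {s0 : PySem.Set Int} {y : Int} :
    y ∈ scc.foldl (fun s src => PySem.Set.update s (f src)) s0 ↔ y ∈ s0 ∨ ∃ src ∈ scc, y ∈ f src := by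
  induction scc generalizing s0 with
  | nil => simp
  | cons a t ih =>
    simp only [List.foldl_cons, ih, PySem.Set.mem_update, List.mem_cons]
    constructor
    · rintro ((h | h) | ⟨src, hs, hy⟩)
      · exact Or.inl h
      · exact Or.inr ⟨a, Or.inl rfl, h⟩
      · exact Or.inr ⟨src, Or.inr hs, hy⟩
    · rintro (h | ⟨src, (rfl | hs), hy⟩)
      · exact Or.inl (Or.inl h)
      · exact Or.inl (Or.inr hy)
      · exact Or.inr ⟨src, hs, hy⟩

theorem is_in_component_true_iff (scc : List Int) (ge : List (Int × List Int)) (lscc : List Int) :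
    is_in_component scc ge lscc = true ↔
      ∃ src ∈ scc, ∃ n ∈ (PySem.Dict.ofList ge).getD src [], n ∈ lscc := by
  unfold is_in_component
  dsimp only
  constructor
  · intro h
    split at h
    · next hpos =>
      have hlen : 0 < ((PySem.Set.inter (scc.foldl (fun s src => PySem.Set.update s ((PySem.Dict.ofList ge).getD src [])) PySem.Set.empty) (PySem.Set.ofList lscc)).length : Nat) := by
        simp only [PySem.Set.len] at hpos
        exact_mod_cast hpos
      obtain ⟨x, hx⟩ := List.exists_mem_of_ne_nil _ (List.length_pos_iff.1 hlen)
      rw [PySem.Set.mem_inter] at hx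
      obtain ⟨hxu, hxl⟩ := hx
      rw [mem_foldl_update] at hxu
      rcases hxu with h0 | ⟨src, hs, hn⟩
      · simp [PySem.Set.empty] at h0
      · exact ⟨src, hs, x, hn, (PySem.Set.mem_ofList _ _).1 hxl⟩
    · exact absurd h (by simp)
  · rintro ⟨src, hs, n, hn, hl⟩
    have hmem : n ∈ PySem.Set.inter (scc.foldl (fun s src => PySem.Set.update s ((PySem.Dict.ofList ge).getD src [])) PySem.Set.empty) (PySem.Set.ofList lscc) := by
      rw [PySem.Set.mem_inter, mem_foldl_update]
      exact ⟨Or.inr ⟨src, hs, hn⟩, (PySem.Set.mem_ofList _ _).2 hl⟩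
    have hpos : 0 < PySem.Set.len (PySem.Set.inter (scc.foldl (fun s src => PySem.Set.update s ((PySem.Dict.ofList ge).getD src [])) PySem.Set.empty) (PySem.Set.ofList lscc)) := by
      simp only [PySem.Set.len]
      exact_mod_cast List.length_pos_of_mem hmem
    simp only [hpos, if_true]

-- the merge scan on two ≤-sorted lists returns true iff they share an element
theorem mergeHasCommon_iff (xs ys : List Int) (hx : xs.Pairwise (· ≤ ·)) (hy : ys.Pairwise (· ≤ ·)) :
    mergeHasCommon xs ys = true ↔ ∃ x, x ∈ xs ∧ x ∈ ys := by
  induction xs, ys using mergeHasCommon.induct with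
  | case1 ys => simp [mergeHasCommon]
  | case2 a as => simp [mergeHasCommon]
  | case3 a as b bs hab ih =>
    rw [mergeHasCommon, if_pos hab, ih (List.Pairwise.sublist (List.sublist_cons_self a as) hx) hy]
    constructor
    · rintro ⟨x, hxs, hys⟩; exact ⟨x, List.mem_cons_of_mem a hxs, hys⟩
    · rintro ⟨x, hxs, hys⟩
      rcases List.mem_cons.1 hxs with rfl | hxs
      · -- x = a is in b :: bs, but every element there is ≥ b > a: contradiction
        exfalso
        rcases List.mem_cons.1 hys with rfl | hys
        · exact absurd hab (lt_irrefl x)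
        · have := (List.pairwise_cons.1 hy).1 x hys
          omega
      · exact ⟨x, hxs, hys⟩
  | case4 a as b bs hab hba ih =>
    rw [mergeHasCommon, if_neg hab, if_pos hba,
        ih hx (List.Pairwise.sublist (List.sublist_cons_self b bs) hy)]
    constructor
    · rintro ⟨x, hxs, hys⟩; exact ⟨x, hxs, List.mem_cons_of_mem b hys⟩
    · rintro ⟨x, hxs, hys⟩
      rcases List.mem_cons.1 hys with rfl | hys
      · exfalso
        rcases List.mem_cons.1 hxs with rfl | hxs
        · exact absurd hba (lt_irrefl x)
        · have := (List.pairwise_cons.1 hx).1 x hxs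
          omega
      · exact ⟨x, hxs, hys⟩
  | case5 a as b bs hab hba =>
    have hba' : a = b := le_antisymm (not_lt.1 hba) (not_lt.1 hab)
    subst hba'
    rw [mergeHasCommon, if_neg hab, if_neg hba]
    simp only [true_iff]
    exact ⟨a, List.mem_cons_self, List.mem_cons_self⟩

theorem is_in_component_alt_true_iff (scc : List Int) (ge : List (Int × List Int)) (lscc : List Int) :
    is_in_component_alt scc ge lscc = true ↔
      ∃ src ∈ scc, ∃ n ∈ (PySem.Dict.ofList ge).getD src [], n ∈ lscc := by
  unfold is_in_component_alt
  dsimp only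
  rw [mergeHasCommon_iff _ _ (PySem.List.sorted_pairwise _ _) (PySem.List.sorted_pairwise _ _)]
  constructor
  · rintro ⟨x, hxs, hys⟩
    rw [PySem.List.mem_sorted] at hxs hys
    obtain ⟨src, hsrc, hn⟩ := List.mem_flatMap.1 hxs
    exact ⟨src, hsrc, x, hn, hys⟩
  · rintro ⟨src, hs, n, hn, hl⟩
    refine ⟨n, ?_, ?_⟩
    · rw [PySem.List.mem_sorted]; exact List.mem_flatMap.2 ⟨src, hs, hn⟩
    · rw [PySem.List.mem_sorted]; exact hl

-- ===== VERDICT =====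
theorem is_in_component_spec : Claim_equal_is_in_component := by
  intro scc ge lscc _ _
  unfold Spec_is_in_component
  rw [Bool.eq_iff_iff, is_in_component_true_iff, is_in_component_alt_true_iff]
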